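-- pv_equiv track=rewrite | github.com/F64081169/Wireless | F64081169_莫寶琳_TermProject/New_Q2/Minimum/function_minimum.py | check_turn
-- ===== SOURCE A (Python) =====
-- BLOCK_SIZE = (50,50)
--
-- ROAD_WIDTH = 2
--
-- def check_turn(x,y):
--     for i in range(10):
--         for j in range(10):
--             car_x = ( (BLOCK_SIZE[0] + ROAD_WIDTH) * i) + BLOCK_SIZE[0]
--             car_y = ( (BLOCK_SIZE[1] + ROAD_WIDTH) * j) + BLOCK_SIZE[1]
--             if car_x == x and car_y == y:
--                 return 1
--     return 0
-- ===== SOURCE B (Python) =====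
-- def check_turn(x, y):
--     def on_axis(v):
--         q, r = divmod(v - 50, 52)
--         return r == 0 and 0 <= q <= 9
--     return 1 if on_axis(x) and on_axis(y) else 0
-- ===== Notes on version B (the rewrite author's own statement) =====
-- stated objective: simpler
-- what changed: Replaced the 10x10 nested search loop with a closed-form divisibility-and-range test on each coordinate independently (q,r = divmod(v-50,52); hit iff r==0 and 0<=q<=9).
import Mathlib
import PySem

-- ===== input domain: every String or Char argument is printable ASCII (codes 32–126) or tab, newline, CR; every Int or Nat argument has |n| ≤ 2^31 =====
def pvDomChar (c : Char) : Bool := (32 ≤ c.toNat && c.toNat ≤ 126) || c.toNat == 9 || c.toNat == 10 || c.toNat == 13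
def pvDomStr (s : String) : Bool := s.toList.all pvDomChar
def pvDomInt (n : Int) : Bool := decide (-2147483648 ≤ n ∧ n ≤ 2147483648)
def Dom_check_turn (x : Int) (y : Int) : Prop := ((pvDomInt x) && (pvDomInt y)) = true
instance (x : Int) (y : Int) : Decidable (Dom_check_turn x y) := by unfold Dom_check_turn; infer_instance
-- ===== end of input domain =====

-- B replaces A's 10x10 nested search with a closed-form divisibility-and-range test per coordinate (simpler).


-- ===== PORT A =====
-- inner 'for j in range(10)' loop: some 1 models the early 'return 1', none = fell through
def ctInner (x y i : Int) : List Int → Option Int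
  | [] => none
  | j :: js =>
    let car_x := (50 + 2) * i + 50
    let car_y := (50 + 2) * j + 50
    if car_x = x ∧ car_y = y then some 1 else ctInner x y i js

-- outer 'for i in range(10)' loop
def ctOuter (x y : Int) : List Int → Option Int
  | [] => none
  | i :: is =>
    match ctInner x y i (PySem.List.pyRange 0 10 1) with
    | some v => some v
    | none => ctOuter x y is

def check_turn (x : Int) (y : Int) : Int :=
  (ctOuter x y (PySem.List.pyRange 0 10 1)).getD 0   -- final 'return 0' when no early return fired

-- ===== PORT B =====
def onAxis (v : Int) : Bool :=
  let q := PySem.Int.floordiv (v - 50) 52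
  let r := PySem.Int.mod (v - 50) 52
  r == 0 && decide (0 ≤ q) && decide (q ≤ 9)

def check_turn_alt (x : Int) (y : Int) : Int :=
  if onAxis x && onAxis y then 1 else 0

-- ===== PRECONDITION & SPEC =====
def Spec_check_turn (x : Int) (y : Int) (out : Int) : Prop := out = check_turn_alt x y
instance (x : Int) (y : Int) (out : Int) : Decidable (Spec_check_turn x y out) := by unfold Spec_check_turn; infer_instance

-- ===== CLAIM (what is proved, stated in full; the proofs are below) =====
def Claim_equal_check_turn : Prop := ∀ (x : Int) (y : Int), Dom_check_turn x y → Spec_check_turn x y (check_turn x y)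

-- ===== LEMMAS AND PROOFS =====

theorem inner_char (x y i : Int) (js : List Int) :
    ctInner x y i js =
      if (50 + 2) * i + 50 = x ∧ ∃ j ∈ js, (50 + 2) * j + 50 = y then some 1 else none := by
  induction js with
  | nil => simp [ctInner]
  | cons j js ih =>
    simp only [ctInner, ih]
    by_cases hA : (50 + 2) * i + 50 = x ∧ (50 + 2) * j + 50 = y
    · rw [if_pos hA]
      exact (if_pos ⟨hA.1, ⟨j, List.mem_cons.mpr (Or.inl rfl), hA.2⟩⟩).symm
    · rw [if_neg hA]
      apply if_congr _ rfl rfl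
      constructor
      · rintro ⟨hx, j', hj', hy⟩; exact ⟨hx, j', List.mem_cons_of_mem _ hj', hy⟩
      · rintro ⟨hx, j', hj', hy⟩
        rcases List.mem_cons.mp hj' with rfl | hmem
        · exact absurd ⟨hx, hy⟩ hA
        · exact ⟨hx, j', hmem, hy⟩

theorem outer_char (x y : Int) (is : List Int) :
    ctOuter x y is =
      if (∃ i ∈ is, (50 + 2) * i + 50 = x) ∧
          (∃ j ∈ PySem.List.pyRange 0 10 1, (50 + 2) * j + 50 = y) then some 1 else none := by
  induction is with
  | nil => simp [ctOuter]
  | cons i is ih =>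
    simp only [ctOuter, inner_char, ih]
    by_cases hA : (50 + 2) * i + 50 = x ∧ ∃ j ∈ PySem.List.pyRange 0 10 1, (50 + 2) * j + 50 = y
    · rw [if_pos hA]
      exact (if_pos ⟨⟨i, List.mem_cons.mpr (Or.inl rfl), hA.1⟩, hA.2⟩).symm
    · rw [if_neg hA]
      apply if_congr _ rfl rfl
      constructor
      · rintro ⟨⟨i', hi', hx⟩, hy⟩; exact ⟨⟨i', List.mem_cons_of_mem _ hi', hx⟩, hy⟩
      · rintro ⟨⟨i', hi', hx⟩, hy⟩
        rcases List.mem_cons.mp hi' with rfl | hmem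
        · exact absurd ⟨hx, hy⟩ hA
        · exact ⟨⟨i', hmem, hx⟩, hy⟩

theorem onAxis_iff (v : Int) :
    onAxis v = true ↔ ∃ i ∈ PySem.List.pyRange 0 10 1, (50 + 2) * i + 50 = v := by
  have hd : PySem.Int.floordiv (v - 50) 52 = (v - 50) / 52 :=
    PySem.Int.floordiv_eq_ediv_of_pos (by norm_num)
  have hm : PySem.Int.mod (v - 50) 52 = (v - 50) % 52 :=
    PySem.Int.mod_eq_emod_of_pos (by norm_num)
  simp only [onAxis, hd, hm, Bool.and_eq_true, beq_iff_eq, decide_eq_true_eq,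
    show PySem.List.pyRange 0 10 1 = [0,1,2,3,4,5,6,7,8,9] from by decide,
    List.mem_cons, List.not_mem_nil, or_false, exists_eq_or_imp, exists_eq_left]
  omega

-- ===== VERDICT (by name: the statement is the Claim_ definition above) =====
theorem check_turn_spec : Claim_equal_check_turn := by
  intro x y _
  show check_turn x y = check_turn_alt x y
  rw [check_turn, outer_char, check_turn_alt]
  by_cases hc : (∃ i ∈ PySem.List.pyRange 0 10 1, (50 + 2) * i + 50 = x) ∧
      (∃ j ∈ PySem.List.pyRange 0 10 1, (50 + 2) * j + 50 = y)
  · rw [if_pos hc, Option.getD_some,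
      if_pos (Bool.and_eq_true _ _ ▸ ⟨(onAxis_iff x).mpr hc.1, (onAxis_iff y).mpr hc.2⟩)]
  · rw [if_neg hc, Option.getD_none, if_neg]
    intro hb
    rcases Bool.and_eq_true _ _ |>.mp hb with ⟨hbx, hby⟩
    exact hc ⟨(onAxis_iff x).mp hbx, (onAxis_iff y).mp hby⟩
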